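-- pv_equiv track=rewrite | github.com/Hoon-Jung/USACO-Prep-2023-2024 | february 2022 bronze/q1_sleeping_in_class (complete).py | minmodsmult
-- ===== SOURCE A (Python) =====
-- def makegroups(values, group):#return new list and added amount
--     te = []
--     fin = []
--     add = 0
--     su = 0
--     for i in range(len(values)):
--         te.append(values[i])
--         su += values[i]
--         if su == group:
--             fin.append(group)
--             add += len(te) - 1
--             te = []
--             su = 0
--     fin += te
--     return fin, add
--
-- def minmodsmult(length, vs):
--     vs = list(map(int, vs))
--     total = sum(vs)
--     ma = max(vs)
--     possibles = []
--     su = 0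
--     if total == 0:
--         return 0
--     else:
--         for i in range(length):
--             su += vs[i]
--             if (su == 0):
--                 continue
--             elif (total % su == 0) and su >= ma:
--                 possibles.append(su)
--             elif su >= total:
--                 break
--
--     if len(possibles) == 1:
--         return len(vs) - 1
--     else:
--         for j in range(len(possibles)):
--             made, addedamt = makegroups(vs, possibles[j])
--             if len(set(made)) == 1:
--                 return addedamt
--         return len(vs) - 1
-- ===== SOURCE B (Python) =====
-- import bisect
--
-- def minmodsmult(length, vs):
--     vs = [int(v) for v in vs]
--     total = sum(vs)
--     ma = max(vs)
--     if total == 0: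
--         return 0
--     n = len(vs)
--     # prefix sums pref[0..n], pref[0] = 0
--     pref = [0]
--     for v in vs:
--         pref.append(pref[-1] + v)
--     possibles = []
--     for i in range(length):
--         su = pref[i + 1]
--         if su == 0:
--             continue
--         elif total % su == 0 and su >= ma:
--             possibles.append(su)
--         elif su >= total:
--             break
--     if len(possibles) == 1:
--         return n - 1
--     # index each prefix value to its ascending list of positions 1..n
--     idx = {}
--     for q in range(1, n + 1):
--         idx.setdefault(pref[q], []).append(q)
--     for g in possibles:
--         # jump through the first occurrences of g, 2g, ... after the previous cut
--         j, t = 0, g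
--         while True:
--             ps = idx.get(t, [])
--             p = bisect.bisect_left(ps, j + 1)
--             if p == len(ps):
--                 break
--             i = ps[p]
--             if i == n:
--                 return n - total // g
--             j, t = i, t + g
--     return n - 1
-- ===== Notes on version B (the rewrite author's own statement) =====
-- stated objective: alternative
-- what changed: A verifies each candidate group sum g by re-scanning all of vs with makegroups, building a block list and testing len(set(made))==1; B instead precomputes the prefix-sum array and a dict mapping each prefix value to its ascending positions, verifies g by jumping through the first occurrences of g, 2g, ... via bisect (no per-candidate scan of the values), and returns len(vs) - total//g arithmetically instead of A's accumulated add counter.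
-- outside the precondition, e.g. on minmodsmult(5, [7, -2]): A returns 1, B returns 1; on minmodsmult(3, [1, 2]): A raises IndexError, B raises IndexError
import Mathlib
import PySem

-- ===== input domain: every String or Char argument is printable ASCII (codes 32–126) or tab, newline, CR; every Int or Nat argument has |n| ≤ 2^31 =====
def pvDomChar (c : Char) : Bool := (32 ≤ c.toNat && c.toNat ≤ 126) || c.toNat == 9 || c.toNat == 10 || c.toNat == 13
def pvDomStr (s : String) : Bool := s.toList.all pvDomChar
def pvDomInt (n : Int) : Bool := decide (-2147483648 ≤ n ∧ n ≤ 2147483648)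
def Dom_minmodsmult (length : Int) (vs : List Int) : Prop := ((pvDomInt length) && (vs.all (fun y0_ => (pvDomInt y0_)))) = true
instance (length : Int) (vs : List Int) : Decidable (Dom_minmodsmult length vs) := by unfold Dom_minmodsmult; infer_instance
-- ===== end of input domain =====

-- B verifies each candidate block sum by jumping through a precomputed index (prefix value -> positions,
-- binary-searched) instead of A's per-candidate rebuild of block lists compared through a set; objective: alternative.

-- ===== PORT A =====
-- loop body of makegroups' for-loop; state = (te, fin, add, su)
def mgStep (group : Int) (st : List Int × List Int × Int × Int) (v : Int) : List Int × List Int × Int × Int :=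
  let te := st.1 ++ [v]
  let su := st.2.2.2 + v
  if su = group then ([], st.2.1 ++ [group], st.2.2.1 + ((te.length : Int) - 1), 0)
  else (te, st.2.1, st.2.2.1, su)

def makegroups (values : List Int) (group : Int) : List Int × Int :=
  let s := values.foldl (mgStep group) ([], [], 0, 0)
  (s.2.1 ++ s.1, s.2.2.1)

-- candidate-loop body on the fetched element; state = (su, possibles, broke) ('broke' models Python's break)
def candStepV (total ma : Int) (st : Int × List Int × Bool) (v : Int) : Int × List Int × Bool :=
  if st.2.2 then st
  else
    let su := st.1 + v
    if su = 0 then (su, st.2.1, false)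
    else if PySem.Int.mod total su = 0 ∧ ma ≤ su then (su, st.2.1 ++ [su], false)
    else if total ≤ su then (su, st.2.1, true)
    else (su, st.2.1, false)

def candStep (vs : List Int) (total ma : Int) (st : Int × List Int × Bool) (i : Int) : Int × List Int × Bool :=
  candStepV total ma st (PySem.List.pyGetD vs i 0)

-- 'for j in range(len(possibles)): … return addedamt' with the trailing 'return len(vs)-1'
def tryLoop (vs : List Int) : List Int → Int
  | [] => (vs.length : Int) - 1
  | g :: rest =>
    let mg := makegroups vs g
    if (PySem.Set.ofList mg.1).length = 1 then mg.2 else tryLoop vs rest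

def minmodsmult (length : Int) (vs : List Int) : Int :=
  let total := vs.sum
  let ma := (PySem.List.max? vs (fun x => x)).getD 0   -- max(vs); none only for vs = [] where Python raises (outside Pre_)
  if total = 0 then 0
  else
    let st := (PySem.List.pyRange 0 length 1).foldl (candStep vs total ma) (0, [], false)
    if st.2.1.length = 1 then (vs.length : Int) - 1
    else tryLoop vs st.2.1

-- ===== PORT B =====
-- pref = [0]; for v in vs: pref.append(pref[-1] + v)
def altPref (vs : List Int) : List Int :=
  vs.foldl (fun ps v => ps ++ [PySem.List.pyGetD ps (-1) 0 + v]) [0]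

-- candidate-loop body on the fetched prefix value; state = (possibles, broke)
def altCandStepV (total ma : Int) (st : List Int × Bool) (su : Int) : List Int × Bool :=
  if st.2 then st
  else if su = 0 then st
  else if PySem.Int.mod total su = 0 ∧ ma ≤ su then (st.1 ++ [su], false)
  else if total ≤ su then (st.1, true)
  else st

def altCandStep (total ma : Int) (pref : List Int) (st : List Int × Bool) (i : Int) : List Int × Bool :=
  altCandStepV total ma st (PySem.List.pyGetD pref (i + 1) 0)

-- idx: prefix value -> ascending list of positions 1..n  (setdefault(..., []).append(q) = modify with default [])
def altIdx (pref : List Int) (n : Int) : PySem.Dict Int (List Int) :=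
  (PySem.List.pyRange 1 (n + 1) 1).foldl
    (fun d q => d.modify (PySem.List.pyGetD pref q 0) [] (fun l => l ++ [q])) PySem.Dict.empty

-- 'while True' jump chain; fuel only makes the recursion structural (each jump strictly increases j ≤ n,
-- so fuel n+1 is never exhausted — proved in chain_iff below)
def altChase (idx : PySem.Dict Int (List Int)) (n : Int) (g : Int) : Nat → Int → Int → Bool
  | 0, _, _ => false
  | fuel + 1, j, t =>
    let ps := idx.getD t []
    let p := PySem.List.bisectLeft ps (j + 1)
    if p = ps.length then false
    else
      let i := ps.getD p 0
      if i = n then true else altChase idx n g fuel i (t + g)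

def altTryLoop (idx : PySem.Dict Int (List Int)) (n total : Int) (fuel : Nat) : List Int → Int
  | [] => n - 1
  | g :: rest =>
    if altChase idx n g fuel 0 g then n - PySem.Int.floordiv total g
    else altTryLoop idx n total fuel rest

def minmodsmult_alt (length : Int) (vs : List Int) : Int :=
  let total := vs.sum
  let ma := (PySem.List.max? vs (fun x => x)).getD 0
  if total = 0 then 0
  else
    let n : Int := (vs.length : Int)
    let pref := altPref vs
    let possibles := ((PySem.List.pyRange 0 length 1).foldl (altCandStep total ma pref) ([], false)).1
    if possibles.length = 1 then n - 1
    else altTryLoop (altIdx pref n) n total (vs.length + 1) possibles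

-- ===== PRECONDITION & SPEC =====
-- Pre_ excludes empty vs (max(vs) raises ValueError) and length > len(vs) with nonzero total, where A's
-- index loop in general raises IndexError (an early break accidentally rescues a few such inputs, on
-- which A returns; those stay excluded).
def Pre_minmodsmult (length : Int) (vs : List Int) : Prop :=
  vs ≠ [] ∧ (vs.sum = 0 ∨ length ≤ (vs.length : Int))
instance (length : Int) (vs : List Int) : Decidable (Pre_minmodsmult length vs) := by
  unfold Pre_minmodsmult; infer_instance

def pvWitness_minmodsmult : Int × List Int := (2, [3, 3])

def Spec_minmodsmult (length : Int) (vs : List Int) (out : Int) : Prop := out = minmodsmult_alt length vs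
instance (length : Int) (vs : List Int) (out : Int) : Decidable (Spec_minmodsmult length vs out) := by unfold Spec_minmodsmult; infer_instance

-- ===== CLAIM (what is proved, stated in full; the proofs are below) =====
def Claim_equal_minmodsmult : Prop := ∀ (length : Int) (vs : List Int), Dom_minmodsmult length vs → Pre_minmodsmult length vs → Spec_minmodsmult length vs (minmodsmult length vs)

-- ===== LEMMAS AND PROOFS =====

-- proof-side: the reset walk used as the bridge between A's makegroups/set test and B's jump chain
def walkStep (g : Int) (st : Int × Int) (v : Int) : Int × Int :=
  let run := st.1 + v
  let pending := st.2 + 1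
  if run = g then ((0 : Int), (0 : Int)) else (run, pending)

def altVerify (vs : List Int) (g : Int) : Int × Int := vs.foldl (walkStep g) (0, 0)

-- running prefix sums starting from su
def scanSums (su : Int) : List Int → List Int
  | [] => []
  | v :: r => (su + v) :: scanSums (su + v) r

lemma scan_length (l : List Int) : ∀ su, (scanSums su l).length = l.length := by
  induction l with
  | nil => intro su; rfl
  | cons v r ih => intro su; simp [scanSums, ih]

lemma scan_take (l : List Int) : ∀ su (k : Nat), scanSums su (l.take k) = (scanSums su l).take k := by
  induction l with
  | nil => intro su k; simp [scanSums]
  | cons v r ih =>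
    intro su k
    cases k with
    | zero => simp [scanSums]
    | succ m => simp [scanSums, ih]

lemma scan_getD (l : List Int) : ∀ su (q : Nat), q < l.length →
    (scanSums su l).getD q 0 = su + (l.take (q + 1)).sum := by
  induction l with
  | nil => intro su q h; simp at h
  | cons v r ih =>
    intro su q h
    cases q with
    | zero => simp [scanSums]
    | succ m =>
      have hm : m < r.length := by simpa using h
      simp only [scanSums, List.getD_cons_succ, List.take_succ_cons, List.sum_cons]
      rw [ih (su + v) m hm]; ring

lemma scan_mem (l : List Int) : ∀ (su y : Int), y ∈ scanSums su l →
    ∃ p, p ≠ [] ∧ p <+: l ∧ y = su + p.sum := by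
  induction l with
  | nil => intro su y h; simp [scanSums] at h
  | cons v r ih =>
    intro su y h
    simp only [scanSums, List.mem_cons] at h
    rcases h with h | h
    · exact ⟨[v], by simp, ⟨r, rfl⟩, by simpa using h⟩
    · obtain ⟨p, hne, hpre, hsum⟩ := ih (su + v) y h
      obtain ⟨t, ht⟩ := hpre
      exact ⟨v :: p, by simp, ⟨t, by simp [ht]⟩, by simp [hsum]; ring⟩

lemma altPref_aux (l : List Int) : ∀ (ps : List Int) (su : Int),
    PySem.List.pyGetD ps (-1) 0 = su →
    l.foldl (fun ps v => ps ++ [PySem.List.pyGetD ps (-1) 0 + v]) ps = ps ++ scanSums su l := by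
  induction l with
  | nil => intro ps su _; simp [scanSums]
  | cons v r ih =>
    intro ps su h
    simp only [List.foldl, scanSums, h]
    rw [ih (ps ++ [su + v]) (su + v) (PySem.List.pyGetD_neg_one_append_singleton ps (su + v) 0)]
    simp

lemma altPref_eq (vs : List Int) : altPref vs = 0 :: scanSums 0 vs := by
  unfold altPref
  rw [altPref_aux vs [0] 0 (by rfl)]
  rfl

lemma pref_getD (vs : List Int) (q : Nat) (h : q ≤ vs.length) :
    (0 :: scanSums 0 vs).getD q 0 = (vs.take q).sum := by
  cases q with
  | zero => simp
  | succ m =>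
    have hm : m < vs.length := h
    simp only [List.getD_cons_succ]
    rw [scan_getD vs 0 m hm, zero_add]

lemma pyGetD_cons_succ_int (x : Int) (xs : List Int) (i : Int) (d : Int) (h : 0 ≤ i) :
    PySem.List.pyGetD (x :: xs) (i + 1) d = PySem.List.pyGetD xs i d := by
  obtain ⟨k, rfl⟩ := Int.eq_ofNat_of_zero_le h
  have : ((k : Int) + 1) = ((k + 1 : Nat) : Int) := by push_cast; ring
  rw [this, PySem.List.pyGetD_natCast, PySem.List.pyGetD_natCast]
  simp

lemma cand_broke (total ma : Int) (l : List Int) (st : Int × List Int × Bool) (h : st.2.2 = true) :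
    l.foldl (candStepV total ma) st = st := by
  induction l generalizing st with
  | nil => rfl
  | cons v r ih =>
    simp only [List.foldl]
    rw [show candStepV total ma st v = st by simp [candStepV, h]]
    exact ih st h

lemma altcand_broke (total ma : Int) (l : List Int) (acc : List Int) :
    l.foldl (altCandStepV total ma) (acc, true) = (acc, true) := by
  induction l with
  | nil => rfl
  | cons v r ih => simpa [List.foldl, altCandStepV] using ih

lemma cand_pair_eq (total ma : Int) (l : List Int) : ∀ (su : Int) (acc : List Int),
    (l.foldl (candStepV total ma) (su, acc, false)).2
      = (scanSums su l).foldl (altCandStepV total ma) (acc, false) := by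
  induction l with
  | nil => intro su acc; simp [scanSums]
  | cons v r ih =>
    intro su acc
    simp only [List.foldl, scanSums, candStepV, altCandStepV]
    by_cases h0 : su + v = 0
    · simp [h0, ih]
    · by_cases hc : PySem.Int.mod total (su + v) = 0 ∧ ma ≤ su + v
      · simp [h0, hc, ih]
      · by_cases hb : total ≤ su + v
        · simp only [h0, hc, hb, if_false, if_true, Bool.false_eq_true]
          rw [cand_broke total ma r _ rfl, altcand_broke]
        · simp [h0, hc, hb, ih]

lemma candV_mem (total ma : Int) (l : List Int) : ∀ (acc : List Int) (b : Bool) (y : Int),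
    y ∈ (l.foldl (altCandStepV total ma) (acc, b)).1 → y ∈ acc ∨ (y ∈ l ∧ y ≠ 0) := by
  induction l with
  | nil => intro acc b y h; exact Or.inl h
  | cons v r ih =>
    intro acc b y h
    simp only [List.foldl, altCandStepV] at h
    by_cases hbr : b = true
    · rw [if_pos hbr] at h
      rcases ih acc b y h with h' | ⟨h1, h2⟩
      · exact Or.inl h'
      · exact Or.inr ⟨List.mem_cons_of_mem v h1, h2⟩
    · rw [if_neg hbr] at h
      by_cases h0 : v = 0
      · rw [if_pos h0] at h
        rcases ih acc b y h with h' | ⟨h1, h2⟩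
        · exact Or.inl h'
        · exact Or.inr ⟨List.mem_cons_of_mem v h1, h2⟩
      · rw [if_neg h0] at h
        by_cases hc : PySem.Int.mod total v = 0 ∧ ma ≤ v
        · rw [if_pos hc] at h
          rcases ih (acc ++ [v]) false y h with h' | ⟨h1, h2⟩
          · rcases List.mem_append.1 h' with h'' | h''
            · exact Or.inl h''
            · simp at h''; subst h''; exact Or.inr ⟨List.mem_cons_self, h0⟩
          · exact Or.inr ⟨List.mem_cons_of_mem v h1, h2⟩
        · rw [if_neg hc] at h
          by_cases hb : total ≤ v
          · rw [if_pos hb] at h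
            rcases ih acc true y h with h' | ⟨h1, h2⟩
            · exact Or.inl h'
            · exact Or.inr ⟨List.mem_cons_of_mem v h1, h2⟩
          · rw [if_neg hb] at h
            rcases ih acc b y h with h' | ⟨h1, h2⟩
            · exact Or.inl h'
            · exact Or.inr ⟨List.mem_cons_of_mem v h1, h2⟩

lemma range_foldl_take {S : Type} (vs : List Int) (n : Nat) (hn : n ≤ vs.length)
    (f : S → Int → S) (init : S) :
    (PySem.List.pyRange 0 (n : Int) 1).foldl (fun st i => f st (PySem.List.pyGetD vs i 0)) init
      = (vs.take n).foldl f init := by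
  induction n generalizing init with
  | zero => simp
  | succ m ih =>
    have h1 : ((m + 1 : Nat) : Int) = (m : Int) + 1 := by push_cast; ring
    rw [h1, PySem.List.pyRange_one_succ_right (by positivity), List.foldl_append]
    have hm : m < vs.length := hn
    rw [ih (le_of_lt hm)]
    have h2 : vs.take (m + 1) = vs.take m ++ [vs[m]] := by
      rw [List.take_add_one]; simp [List.getElem?_eq_getElem hm]
    rw [h2, List.foldl_append]
    simp [PySem.List.pyGetD_natCast, List.getD, List.getElem?_eq_getElem hm]

lemma verify_sync (g : Int) (l : List Int) : ∀ (te fin : List Int) (add su : Int),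
    (l.foldl (walkStep g) (su, (te.length : Int))).2
      = (((l.foldl (mgStep g) (te, fin, add, su)).1).length : Int) := by
  induction l with
  | nil => intro te fin add su; rfl
  | cons v r ih =>
    intro te fin add su
    simp only [List.foldl, mgStep, walkStep]
    by_cases h : su + v = g
    · rw [if_pos h, if_pos h]
      have := ih [] (fin ++ [g]) (add + (((te ++ [v]).length : Int) - 1)) 0
      simpa using this
    · rw [if_neg h, if_neg h]
      have := ih (te ++ [v]) fin add (su + v)
      simpa [add_comm] using this

def MGInv (g : Int) (p : List Int) (st : List Int × List Int × Int × Int) : Prop :=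
  st.2.2.2 = st.1.sum ∧
  (∀ x ∈ st.2.1, x = g) ∧
  st.2.2.1 = (p.length : Int) - (st.1.length : Int) - (st.2.1.length : Int) ∧
  p.sum = (st.2.1.length : Int) * g + st.2.2.2 ∧
  (∀ q, q ≠ [] → q <+: st.1 → q.sum ≠ g) ∧
  (st.2.1 = [] → st.1 = p)

lemma mg_inv (g : Int) (l : List Int) : ∀ (p : List Int) (st : List Int × List Int × Int × Int),
    MGInv g p st → MGInv g (p ++ l) (l.foldl (mgStep g) st) := by
  induction l with
  | nil => intro p st h; simpa using h
  | cons v r ih =>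
    intro p st h
    obtain ⟨te, fin, add, su⟩ := st
    obtain ⟨h1, h2, h3, h4, h5, h6⟩ := h
    simp only at h1 h2 h3 h4 h5 h6
    have hassoc : p ++ v :: r = (p ++ [v]) ++ r := by simp
    rw [hassoc]
    simp only [List.foldl, mgStep]
    by_cases hg : su + v = g
    · rw [if_pos hg]
      apply ih
      refine ⟨by simp, ?_, ?_, ?_, ?_, by simp⟩
      · intro x hx
        rcases List.mem_append.1 hx with hx | hx
        · exact h2 x hx
        · simpa using hx
      · simp only [List.length_nil, List.length_append, List.length_cons]
        push_cast
        omega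
      · simp only [List.sum_append, List.length_append, List.length_cons, List.length_nil,
          List.sum_cons, List.sum_nil]
        push_cast
        rw [h4]
        linear_combination hg
      · intro q hq hpre
        simp at hpre
        simp [hpre] at hq
    · rw [if_neg hg]
      apply ih
      refine ⟨by simp [h1], h2, ?_, ?_, ?_, ?_⟩
      · simp only [List.length_append, List.length_cons]
        push_cast
        omega
      · simp only [List.sum_append, List.sum_cons, List.sum_nil]
        rw [h4]; ring
      · intro q hq hpre
        rcases List.prefix_concat_iff.1 hpre with hq' | hq'
        · subst hq'
          simpa [h1] using hg
        · exact h5 q hq hq'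
      · intro hfin
        rw [h6 hfin]

lemma set_len_one (g : Int) (l : List Int) (h : l ≠ []) (h2 : ∀ x ∈ l, x = g) :
    (PySem.Set.ofList l).length = 1 := by
  have hm : ∀ x ∈ PySem.Set.ofList l, x = g := by
    intro x hx
    exact h2 x ((PySem.Set.mem_ofList _ _).1 hx)
  have hnd : (PySem.Set.ofList l : List Int).Nodup := PySem.Set.nodup_ofList l
  have hne : (PySem.Set.ofList l : List Int) ≠ [] := by
    obtain ⟨a, l', rfl⟩ := List.exists_cons_of_ne_nil h
    intro hcon
    have : a ∈ PySem.Set.ofList (a :: l') := (PySem.Set.mem_ofList _ _).2 (List.mem_cons_self)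
    rw [hcon] at this
    simp at this
  match hl : (PySem.Set.ofList l : List Int), hnd, hne, hm with
  | [], _, hne, _ => exact absurd rfl hne
  | [x], _, _, _ => rfl
  | x :: y :: r, hnd, _, hm =>
    have hx := hm x (by simp)
    have hy := hm y (by simp)
    rw [List.nodup_cons] at hnd
    exact absurd (by simp [hx, hy] : x ∈ y :: r) hnd.1

lemma set_len_ne_one (l : List Int) (a b : Int) (ha : a ∈ l) (hb : b ∈ l) (hab : a ≠ b) :
    (PySem.Set.ofList l).length ≠ 1 := by
  intro hlen
  have ha' : a ∈ PySem.Set.ofList l := (PySem.Set.mem_ofList _ _).2 ha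
  have hb' : b ∈ PySem.Set.ofList l := (PySem.Set.mem_ofList _ _).2 hb
  match hl : (PySem.Set.ofList l : List Int), hlen, ha', hb' with
  | [x], _, ha', hb' =>
    simp at ha' hb'
    exact hab (ha'.trans hb'.symm)

lemma cand_equiv (vs : List Int) (g : Int) (hg : g ≠ 0)
    (hp : ∃ p, p ≠ [] ∧ p <+: vs ∧ p.sum = g) :
    ((PySem.Set.ofList (makegroups vs g).1).length = 1 ↔ (altVerify vs g).2 = 0) ∧
    ((altVerify vs g).2 = 0 → (makegroups vs g).2 = (vs.length : Int) - PySem.Int.floordiv vs.sum g) := by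
  obtain ⟨p0, hp0ne, hp0pre, hp0sum⟩ := hp
  have hvs : vs ≠ [] := by
    rintro rfl
    exact hp0ne (List.prefix_nil.1 hp0pre)
  have hinv : MGInv g vs (vs.foldl (mgStep g) ([], [], 0, 0)) := by
    have := mg_inv g vs [] ([], [], 0, 0) (by
      refine ⟨rfl, by simp, by simp, by simp, ?_, by simp⟩
      intro q hq hpre
      exact absurd (List.prefix_nil.1 hpre) hq)
    simpa using this
  set s := vs.foldl (mgStep g) ([], [], 0, 0) with hs
  obtain ⟨h1, h2, h3, h4, h5, h6⟩ := hinv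
  have hsync : (altVerify vs g).2 = (s.1.length : Int) := by
    have := verify_sync g vs [] [] 0 0
    simpa [altVerify] using this
  have hmade : (makegroups vs g).1 = s.2.1 ++ s.1 := rfl
  have hadd : (makegroups vs g).2 = s.2.2.1 := rfl
  rcases hte : s.1 with _ | ⟨t, r⟩
  · have hsu0 : s.2.2.2 = 0 := by rw [h1, hte]; rfl
    have hfin : s.2.1 ≠ [] := by
      intro hf
      exact hvs ((h6 hf).symm.trans hte)
    have hset : (PySem.Set.ofList (makegroups vs g).1).length = 1 := by
      rw [hmade, hte, List.append_nil]
      exact set_len_one g _ hfin h2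
    have hpend : (altVerify vs g).2 = 0 := by rw [hsync, hte]; rfl
    refine ⟨by simp [hset, hpend], fun _ => ?_⟩
    have hsum : vs.sum = (s.2.1.length : Int) * g := by rw [h4, hsu0, add_zero]
    have hdiv : PySem.Int.floordiv vs.sum g = (s.2.1.length : Int) := by
      rw [hsum]
      simp only [PySem.Int.floordiv]
      exact Int.mul_fdiv_cancel _ hg
    rw [hadd, hdiv, h3, hte]
    simp
  · have hpend : (altVerify vs g).2 ≠ 0 := by
      rw [hsync, hte]
      simp only [List.length_cons]
      omega
    have hfin : s.2.1 ≠ [] := by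
      intro hf
      exact h5 p0 hp0ne ((h6 hf).symm ▸ hp0pre) hp0sum
    obtain ⟨f, fr, hfeq⟩ := List.exists_cons_of_ne_nil hfin
    have hfg : f = g := h2 f (by rw [hfeq]; exact List.mem_cons_self)
    have htg : t ≠ g := by
      have := h5 [t] (by simp) (by rw [hte]; exact ⟨r, rfl⟩)
      simpa using this
    have hset : (PySem.Set.ofList (makegroups vs g).1).length ≠ 1 := by
      apply set_len_ne_one _ t g
      · rw [hmade, hte]
        exact List.mem_append.2 (Or.inr (List.mem_cons_self))
      · rw [hmade, hfeq, hfg]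
        exact List.mem_append.2 (Or.inl (List.mem_cons_self))
      · exact htg
    exact ⟨iff_of_false hset hpend, fun h => absurd h hpend⟩

-- ===== the walk ⟷ jump-chain bridge =====

lemma walk_no_cut (g : Int) (l : List Int) : ∀ (r q : Int),
    (∀ p, p ≠ [] → p <+: l → r + p.sum ≠ g) →
    l.foldl (walkStep g) (r, q) = (r + l.sum, q + (l.length : Int)) := by
  induction l with
  | nil => intro r q _; simp
  | cons v rest ih =>
    intro r q h
    have hv : r + v ≠ g := by
      have := h [v] (by simp) ⟨rest, rfl⟩
      simpa using this
    simp only [List.foldl, walkStep, if_neg hv]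
    rw [ih (r + v) (q + 1) (by
      intro p hp hpre
      have := h (v :: p) (by simp) (by obtain ⟨t, ht⟩ := hpre; exact ⟨t, by simp [ht]⟩)
      simp only [List.sum_cons] at this
      intro hc; exact this (by linarith))]
    simp only [List.sum_cons, List.length_cons, Prod.mk.injEq]
    refine ⟨by ring, by push_cast; ring⟩

lemma walk_cut (g : Int) (F : List Int) (m : Nat) (h1 : 1 ≤ m) (h2 : m ≤ F.length)
    (hsum : (F.take m).sum = g)
    (hmin : ∀ k : Nat, 1 ≤ k → k < m → (F.take k).sum ≠ g) :
    F.foldl (walkStep g) (0, 0) = (F.drop m).foldl (walkStep g) (0, 0) := by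
  obtain ⟨k, rfl⟩ : ∃ k, m = k + 1 := ⟨m - 1, by omega⟩
  have hk : k < F.length := by omega
  have htk : F.take (k + 1) = F.take k ++ [F[k]] := by
    rw [List.take_add_one]; simp [List.getElem?_eq_getElem hk]
  have hdecomp : F = F.take k ++ F[k] :: F.drop (k + 1) := by
    conv_lhs => rw [← List.take_append_drop (k + 1) F]
    rw [htk]
    simp
  conv_lhs => rw [hdecomp]
  rw [List.foldl_append]
  rw [walk_no_cut g (F.take k) 0 0 (by
    intro p hp hpre
    have hlen : p.length ≤ k :=
      le_trans hpre.length_le (by rw [List.length_take]; exact min_le_left _ _)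
    have hpe : p = F.take p.length := by
      conv_lhs => rw [List.prefix_iff_eq_take.1 hpre]
      rw [List.take_take]
      congr 1
      omega
    rw [zero_add, hpe]
    exact hmin p.length (by have := List.length_pos_iff.2 hp; omega) (by omega))]
  have hcut : (0 : Int) + (F.take k).sum + F[k] = g := by
    have : (F.take (k + 1)).sum = (F.take k).sum + F[k] := by
      rw [htk, List.sum_append]; simp
    rw [zero_add, ← this, hsum]
  simp only [List.foldl, walkStep, hcut]
  simp

lemma bisect_all_lt (ps : List Int) (x : Int) (hps : ps.Pairwise (· < ·))
    (h : PySem.List.bisectLeft ps x = ps.length) : ∀ q ∈ ps, q < x := by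
  obtain ⟨_, hlt, _⟩ := PySem.List.bisectLeft_spec ps x (hps.imp le_of_lt)
  intro q hq
  obtain ⟨r, hr, rfl⟩ := List.mem_iff_getElem.1 hq
  exact hlt r hr (h ▸ hr)

lemma bisect_found (ps : List Int) (x : Int) (hps : ps.Pairwise (· < ·))
    (h : PySem.List.bisectLeft ps x ≠ ps.length) :
    ps.getD (PySem.List.bisectLeft ps x) 0 ∈ ps ∧
    x ≤ ps.getD (PySem.List.bisectLeft ps x) 0 ∧
    ∀ q ∈ ps, x ≤ q → ps.getD (PySem.List.bisectLeft ps x) 0 ≤ q := by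
  obtain ⟨hle, hlt, hge⟩ := PySem.List.bisectLeft_spec ps x (hps.imp le_of_lt)
  set p := PySem.List.bisectLeft ps x with hp
  have hplen : p < ps.length := lt_of_le_of_ne hle h
  have hgetD : ps.getD p 0 = ps[p] := List.getD_eq_getElem ps 0 hplen
  refine ⟨hgetD ▸ List.getElem_mem hplen, hgetD ▸ hge p hplen le_rfl, ?_⟩
  intro q hq hxq
  obtain ⟨r, hr, rfl⟩ := List.mem_iff_getElem.1 hq
  rw [hgetD]
  rcases lt_trichotomy r p with hrp | hrp | hrp
  · exact absurd hxq (not_le.2 (hlt r hr hrp))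
  · subst hrp; exact le_rfl
  · exact le_of_lt ((List.pairwise_iff_getElem.1 hps) p r hplen hr hrp)

-- membership in the positions list idx.get(t, [])
lemma psl_mem (vs : List Int) (t q : Int) :
    q ∈ (PySem.List.pyRange 1 ((vs.length : Int) + 1) 1).filter
          (fun q => PySem.List.pyGetD (0 :: scanSums 0 vs) q 0 == t)
      ↔ 1 ≤ q ∧ q ≤ (vs.length : Int) ∧ (vs.take q.toNat).sum = t := by
  rw [List.mem_filter]
  rw [PySem.List.mem_pyRange_one]
  constructor
  · rintro ⟨⟨hq1, hq2⟩, hpred⟩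
    refine ⟨hq1, by omega, ?_⟩
    obtain ⟨k, rfl⟩ := Int.eq_ofNat_of_zero_le (by omega : (0:Int) ≤ q)
    rw [PySem.List.pyGetD_natCast] at hpred
    have hk : k ≤ vs.length := by exact_mod_cast (by omega : (k : Int) ≤ (vs.length : Int))
    rw [pref_getD vs k hk] at hpred
    simpa using hpred
  · rintro ⟨hq1, hq2, hsum⟩
    refine ⟨⟨hq1, by omega⟩, ?_⟩
    obtain ⟨k, rfl⟩ := Int.eq_ofNat_of_zero_le (by omega : (0:Int) ≤ q)
    rw [PySem.List.pyGetD_natCast]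
    have hk : k ≤ vs.length := by exact_mod_cast hq2
    rw [pref_getD vs k hk]
    simpa using hsum

lemma psl_pairwise (vs : List Int) (t : Int) :
    ((PySem.List.pyRange 1 ((vs.length : Int) + 1) 1).filter
      (fun q => PySem.List.pyGetD (0 :: scanSums 0 vs) q 0 == t)).Pairwise (· < ·) :=
  (PySem.List.pairwise_lt_pyRange_one 1 ((vs.length : Int) + 1)).sublist List.filter_sublist

lemma altIdx_getD (vs : List Int) (t : Int) :
    (altIdx (altPref vs) (vs.length : Int)).getD t []
      = (PySem.List.pyRange 1 ((vs.length : Int) + 1) 1).filter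
          (fun q => PySem.List.pyGetD (0 :: scanSums 0 vs) q 0 == t) := by
  unfold altIdx
  rw [altPref_eq]
  have hmap : (PySem.List.pyRange 1 ((vs.length : Int) + 1) 1).foldl
      (fun d q => d.modify (PySem.List.pyGetD (0 :: scanSums 0 vs) q 0) [] (fun l => l ++ [q]))
      PySem.Dict.empty
    = ((PySem.List.pyRange 1 ((vs.length : Int) + 1) 1).map
        (fun q => (PySem.List.pyGetD (0 :: scanSums 0 vs) q 0, q))).foldl
      (fun d p => d.modify p.1 [] (fun l => l ++ [p.2])) PySem.Dict.empty := by
    rw [List.foldl_map]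
  rw [hmap, PySem.Dict.getD_foldl_modify_append]
  rw [PySem.Dict.getD_empty, List.nil_append]
  rw [List.filter_map]
  rw [List.map_map]
  simp [Function.comp_def]

-- chase from cut position j with target P(j)+g ⟺ the reset walk on the suffix vs.drop j ends pending 0
lemma chain_iff (vs : List Int) (g : Int) (idx : PySem.Dict Int (List Int))
    (hidx : ∀ t : Int, idx.getD t []
      = (PySem.List.pyRange 1 ((vs.length : Int) + 1) 1).filter
          (fun q => PySem.List.pyGetD (0 :: scanSums 0 vs) q 0 == t)) :
    ∀ (fuel : Nat) (j : Nat), j < vs.length → vs.length - j < fuel →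
      (altChase idx (vs.length : Int) g fuel (j : Int) ((vs.take j).sum + g) = true
        ↔ ((vs.drop j).foldl (walkStep g) (0, 0)).2 = 0) := by
  intro fuel
  induction fuel with
  | zero => intro j hj hf; omega
  | succ fuel ih =>
    intro j hj hf
    set t := (vs.take j).sum + g with ht
    set F := vs.drop j with hF
    have hFlen : F.length = vs.length - j := by simp [hF]
    set psl := (PySem.List.pyRange 1 ((vs.length : Int) + 1) 1).filter
        (fun q => PySem.List.pyGetD (0 :: scanSums 0 vs) q 0 == t) with hpsl
    have hpw : psl.Pairwise (· < ·) := psl_pairwise vs t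
    have hmem : ∀ q : Int, q ∈ psl ↔ 1 ≤ q ∧ q ≤ (vs.length : Int) ∧ (vs.take q.toNat).sum = t :=
      fun q => psl_mem vs t q
    -- cut positions of the suffix walk correspond to psl elements ≥ j+1
    have hcorr : ∀ m : Nat, 1 ≤ m → m ≤ F.length →
        ((F.take m).sum = g ↔ ((j : Int) + m ∈ psl ∧ (j : Int) + 1 ≤ (j : Int) + m)) := by
      intro m hm1 hm2
      have htake : (vs.take (j + m)).sum = (vs.take j).sum + (F.take m).sum := by
        rw [hF, ← List.sum_append, ← List.take_add]
      constructor
      · intro hs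
        refine ⟨(hmem _).2 ⟨by omega, by omega, ?_⟩, by omega⟩
        have : ((j : Int) + m).toNat = j + m := by omega
        rw [this, htake, hs, ht]
      · rintro ⟨hin, _⟩
        have := ((hmem _).1 hin).2.2
        have htn : ((j : Int) + m).toNat = j + m := by omega
        rw [htn, htake, ht] at this
        linarith
    simp only [altChase]
    by_cases hex : ∃ m : Nat, (1 ≤ m ∧ m ≤ F.length) ∧ (F.take m).sum = g
    · -- there is a cut in the suffix; the chase jumps to the first one
      have hexd : ∃ m : Nat, (1 ≤ m ∧ m ≤ F.length) ∧ (F.take m).sum = g := hex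
      classical
      set m0 := Nat.find hexd with hm0
      obtain ⟨⟨hm01, hm02⟩, hm0sum⟩ := Nat.find_spec hexd
      have hm0min : ∀ k : Nat, 1 ≤ k → k < m0 → (F.take k).sum ≠ g := by
        intro k hk1 hk2 hc
        have hk2' : k ≤ F.length := by omega
        exact Nat.find_min hexd hk2 ⟨⟨hk1, hk2'⟩, hc⟩
      -- the first-occurrence position is j + m0
      have hq0 : ((j : Int) + m0) ∈ psl := ((hcorr m0 hm01 hm02).1 hm0sum).1
      have hnl : PySem.List.bisectLeft (idx.getD t []) ((j : Int) + 1) ≠ (idx.getD t []).length := by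
        rw [hidx t, ← hpsl]
        intro hc
        have := bisect_all_lt psl ((j : Int) + 1) hpw hc _ hq0
        omega
      rw [hidx t, ← hpsl] at *
      rw [if_neg hnl]
      obtain ⟨hiin, hige, himin⟩ := bisect_found psl ((j : Int) + 1) hpw hnl
      set i := psl.getD (PySem.List.bisectLeft psl ((j : Int) + 1)) 0 with hi
      have hile : i ≤ (j : Int) + m0 := himin _ hq0 (by omega)
      -- i itself is a cut position, so minimality forces i = j + m0
      have hieq : i = (j : Int) + m0 := by
        obtain ⟨hi1, hi2, hisum⟩ := (hmem i).1 hiin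
        set mi := i.toNat - j with hmi
        have hitn : i.toNat = j + mi := by omega
        have hmi1 : 1 ≤ mi := by omega
        have hmi2 : mi ≤ F.length := by omega
        have : (F.take mi).sum = g := by
          have := (hcorr mi hmi1 hmi2).2 ⟨by rwa [show (j:Int) + mi = i by omega], by omega⟩
          exact this
        have : m0 ≤ mi := Nat.find_min' hexd ⟨⟨hmi1, hmi2⟩, this⟩
        omega
      -- walk: split the suffix at the first cut
      have hwalk : (F.foldl (walkStep g) (0, 0)).2 = ((F.drop m0).foldl (walkStep g) (0, 0)).2 := by
        rw [walk_cut g F m0 hm01 hm02 hm0sum hm0min]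
      by_cases hend : i = (vs.length : Int)
      · rw [if_pos hend]
        have hm0end : m0 = F.length := by omega
        simp only [true_iff]
        rw [hwalk, hm0end]
        simp
      · rw [if_neg hend]
        have hjm : j + m0 < vs.length := by omega
        have hcast : ((j + m0 : Nat) : Int) = (j : Int) + m0 := by push_cast; ring
        have htnext : t + g = (vs.take (j + m0)).sum + g := by
          have htake : (vs.take (j + m0)).sum = (vs.take j).sum + (F.take m0).sum := by
            rw [hF, ← List.sum_append, ← List.take_add]
          rw [htake, hm0sum]
        rw [hieq, ← hcast, htnext]
        rw [ih (j + m0) hjm (by omega)]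
        rw [hwalk, hF, List.drop_drop]
    · -- no cut anywhere in the suffix: chase finds nothing and the walk never resets
      replace hex : ∀ m : Nat, (1 ≤ m ∧ m ≤ F.length) → (F.take m).sum ≠ g := by
        intro m hm hc; exact hex ⟨m, hm, hc⟩
      have hnone : PySem.List.bisectLeft (idx.getD t []) ((j : Int) + 1) = (idx.getD t []).length := by
        rw [hidx t, ← hpsl]
        by_contra hc
        obtain ⟨hiin, hige, _⟩ := bisect_found psl ((j : Int) + 1) hpw hc
        obtain ⟨hi1, hi2, hisum⟩ := (hmem _).1 hiin
        set i := psl.getD (PySem.List.bisectLeft psl ((j : Int) + 1)) 0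
        set mi := i.toNat - j with hmi
        have hmi1 : 1 ≤ mi := by omega
        have hmi2 : mi ≤ F.length := by omega
        have : (F.take mi).sum = g :=
          (hcorr mi hmi1 hmi2).2 ⟨by rwa [show (j:Int) + mi = i by omega], by omega⟩
        exact absurd this (hex mi ⟨hmi1, hmi2⟩)
      rw [hidx t, ← hpsl] at *
      rw [if_pos hnone]
      have hwalk : (F.foldl (walkStep g) (0, 0)).2 = (F.length : Int) := by
        rw [walk_no_cut g F 0 0 (by
          intro p hp hpre
          have hlen1 : 1 ≤ p.length := by have := List.length_pos_iff.2 hp; omega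
          have hlen2 : p.length ≤ F.length := hpre.length_le
          have hpe : p = F.take p.length := List.prefix_iff_eq_take.1 hpre
          rw [zero_add, hpe]
          exact hex p.length ⟨hlen1, hlen2⟩)]
        simp
      simp only [Bool.false_eq_true, false_iff]
      rw [hwalk]
      have : 0 < F.length := by omega
      intro hc
      exact absurd hc (by exact_mod_cast Nat.pos_iff_ne_zero.1 this)

lemma try_eq (vs : List Int) (hvs : vs ≠ []) (ps : List Int)
    (hps : ∀ g ∈ ps, g ≠ 0 ∧ ∃ p, p ≠ [] ∧ p <+: vs ∧ p.sum = g) :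
    tryLoop vs ps
      = altTryLoop (altIdx (altPref vs) (vs.length : Int)) (vs.length : Int) vs.sum
          (vs.length + 1) ps := by
  induction ps with
  | nil => rfl
  | cons gg rest ih =>
    obtain ⟨hg, hp⟩ := hps gg List.mem_cons_self
    obtain ⟨hiff, hval⟩ := cand_equiv vs gg hg hp
    have hn0 : 0 < vs.length := List.length_pos_iff.2 hvs
    have hchain := chain_iff vs gg (altIdx (altPref vs) (vs.length : Int))
      (fun t => altIdx_getD vs t) (vs.length + 1) 0 hn0 (by omega)
    simp only [Nat.cast_zero, List.take_zero, List.sum_nil, zero_add, List.drop_zero] at hchain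
    have hchase : altChase (altIdx (altPref vs) (vs.length : Int)) (vs.length : Int) gg
        (vs.length + 1) 0 gg = true ↔ (altVerify vs gg).2 = 0 := by
      rw [altVerify]; exact hchain
    simp only [tryLoop, altTryLoop]
    by_cases hc : (altVerify vs gg).2 = 0
    · rw [if_pos (hiff.2 hc), if_pos (hchase.2 hc), hval hc]
    · rw [if_neg (fun h => hc (hiff.1 h)), if_neg (by
        intro h
        exact hc (hchase.1 h))]
      exact ih (fun g hgm => hps g (List.mem_cons_of_mem _ hgm))

-- ===== VERDICT (by name: the statement is the Claim_ definition above) =====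
theorem minmodsmult_spec : Claim_equal_minmodsmult := by
  intro length vs _hdom hpre
  obtain ⟨hvs, hpre2⟩ := hpre
  unfold Spec_minmodsmult minmodsmult minmodsmult_alt
  by_cases ht : vs.sum = 0
  · simp [ht]
  · have hlen : length ≤ (vs.length : Int) := hpre2.resolve_left ht
    simp only [if_neg ht]
    rcases le_or_gt 0 length with hl | hl
    · have hlen' : ((length.toNat : Nat) : Int) = length := Int.toNat_of_nonneg hl
      have hnle : length.toNat ≤ vs.length := by omega
      set ma := (PySem.List.max? vs (fun x => x)).getD 0 with hma
      -- A's candidate fold over indices = fold of candStepV over the taken values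
      have hA : (PySem.List.pyRange 0 length 1).foldl
          (candStep vs vs.sum ma) ((0 : Int), ([] : List Int), false)
            = (vs.take length.toNat).foldl (candStepV vs.sum ma) (0, [], false) := by
        rw [← hlen']
        exact range_foldl_take vs length.toNat hnle _ _
      -- B's candidate fold over indices = fold of altCandStepV over the taken prefix sums
      have hBbody : ∀ (st : List Int × Bool) (i : Int), i ∈ PySem.List.pyRange 0 length 1 →
          altCandStep vs.sum ma (altPref vs) st i
            = altCandStepV vs.sum ma st (PySem.List.pyGetD (scanSums 0 vs) i 0) := by
        intro st i hi
        have h0i : 0 ≤ i := (PySem.List.mem_pyRange_one.1 hi).1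
        unfold altCandStep
        rw [altPref_eq, pyGetD_cons_succ_int 0 (scanSums 0 vs) i 0 h0i]
      have hB : (PySem.List.pyRange 0 length 1).foldl
          (altCandStep vs.sum ma (altPref vs)) (([] : List Int), false)
            = ((scanSums 0 vs).take length.toNat).foldl (altCandStepV vs.sum ma) ([], false) := by
        rw [PySem.List.foldl_congr_mem _ _ _ _ hBbody]
        conv_lhs => rw [← hlen']
        exact range_foldl_take (scanSums 0 vs) length.toNat (by rw [scan_length]; exact hnle) _ _
      have hpair : ((vs.take length.toNat).foldl (candStepV vs.sum ma) ((0:Int), ([] : List Int), false)).2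
          = ((scanSums 0 vs).take length.toNat).foldl (altCandStepV vs.sum ma) ([], false) := by
        rw [← scan_take]
        exact cand_pair_eq vs.sum ma (vs.take length.toNat) 0 []
      rw [hA, hB, ← hpair]
      set stA := (vs.take length.toNat).foldl (candStepV vs.sum ma) ((0:Int), ([] : List Int), false) with hstA
      by_cases hone : stA.2.1.length = 1
      · rw [if_pos hone, if_pos hone]
      · rw [if_neg hone, if_neg hone]
        rw [try_eq vs hvs]
        intro g hgmem
        rw [hstA, hpair] at hgmem
        rcases candV_mem vs.sum ma _ _ _ _ hgmem with h | ⟨hmem, hne0⟩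
        · simp at h
        · rw [← scan_take] at hmem
          obtain ⟨p, hpne, hppre, hpsum⟩ := scan_mem _ _ _ hmem
          exact ⟨hne0, p, hpne, hppre.trans (List.take_prefix _ _), by omega⟩
    · have hrange : PySem.List.pyRange 0 length 1 = [] :=
        PySem.List.pyRange_one_eq_nil (by omega)
      rw [hrange]
      simp [tryLoop, altTryLoop]
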